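-- pv_equiv track=rewrite | github.com/20korvin01/geoinformatics_ex2 | code/convex_hull.py | QuickHull
-- ===== SOURCE A (Python) =====
-- def QuickHull(points):
--     """
--     Do the QuickHull Algorithm
--     """
--     def find_side(p1, p2, p):
--         """
--         Determines if the point p is left or right to the line p1...p2
--         """
--         return (p[1] - p1[1]) * (p2[0] - p1[0]) - (p[0] - p1[0]) * (p2[1] - p1[1])
--
--     def hull_subset(p1, p2, subset_points):
--         """
--         Finds hull points on one side of the line p1...p2
--         """
--         if not subset_points:
--             return []
--         # Find the farthest point from the line (p1, p2)
--         farthest = max(subset_points, key=lambda p: abs(find_side(p1, p2, p)))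
--         # Divide points into subsets based on which side of the lines they lie
--         left_of_line = [p for p in subset_points if find_side(p1, farthest, p) > 0]
--         right_of_line = [p for p in subset_points if find_side(farthest, p2, p) > 0]
--
--         # Recurse to find the hull points
--         return hull_subset(p1, farthest, left_of_line) + [farthest] + hull_subset(farthest, p2, right_of_line)
--
--     # Find the leftmost and rightmost points
--     min_point = min(points, key=lambda p: p[0])
--     max_point = max(points, key=lambda p: p[0])
--
--     # Divide points into subsets on either side of the line (min_point, max_point)
--     left_set = [p for p in points if find_side(min_point, max_point, p) > 0]
--     right_set = [p for p in points if find_side(max_point, min_point, p) > 0]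
--
--     # Construct the hull via recursion
--     hull = [min_point] + hull_subset(min_point, max_point, left_set) + \
--            [max_point] + hull_subset(max_point, min_point, right_set)
--     return hull
-- ===== SOURCE B (Python) =====
-- def QuickHull(points):
--     """
--     QuickHull via an explicit work-stack of tasks instead of recursion.
--     Tasks are either ("emit", p) — append p to the hull — or
--     ("seg", p1, p2, subset) — process the points of subset lying left of p1->p2.
--     Popping tasks front-first reproduces the in-order hull sequence.
--     """
--     def side(p1, p2, p):
--         return (p[1] - p1[1]) * (p2[0] - p1[0]) - (p[0] - p1[0]) * (p2[1] - p1[1])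
--
--     # one pass for both extremes (first-minimal / first-maximal in x)
--     mn = mx = points[0]
--     for p in points[1:]:
--         if p[0] < mn[0]:
--             mn = p
--         if mx[0] < p[0]:
--             mx = p
--
--     left_set = [p for p in points if side(mn, mx, p) > 0]
--     right_set = [p for p in points if side(mx, mn, p) > 0]
--
--     hull = []
--     stack = [("seg", mx, mn, right_set), ("emit", mx),
--              ("seg", mn, mx, left_set), ("emit", mn)]
--     while stack:
--         task = stack.pop()
--         if task[0] == "emit":
--             hull.append(task[1])
--         else:
--             _, p1, p2, s = task
--             if not s:
--                 continue
--             # farthest point from the line p1->p2 (first one on distance ties)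
--             far, fd = s[0], abs(side(p1, p2, s[0]))
--             for p in s[1:]:
--                 d = abs(side(p1, p2, p))
--                 if fd < d:
--                     far, fd = p, d
--             left = [p for p in s if side(p1, far, p) > 0]
--             right = [p for p in s if side(far, p2, p) > 0]
--             stack.append(("seg", far, p2, right))
--             stack.append(("emit", far))
--             stack.append(("seg", p1, far, left))
--     return hull
-- ===== Notes on version B (the rewrite author's own statement) =====
-- stated objective: alternative
-- what changed: Replaces QuickHull's recursion with an explicit LIFO work-stack of emit/segment tasks and a hull accumulator built front-to-back, and computes min/max x and the farthest point with single explicit loops instead of min/max-with-key and list slicing.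
import Mathlib
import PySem

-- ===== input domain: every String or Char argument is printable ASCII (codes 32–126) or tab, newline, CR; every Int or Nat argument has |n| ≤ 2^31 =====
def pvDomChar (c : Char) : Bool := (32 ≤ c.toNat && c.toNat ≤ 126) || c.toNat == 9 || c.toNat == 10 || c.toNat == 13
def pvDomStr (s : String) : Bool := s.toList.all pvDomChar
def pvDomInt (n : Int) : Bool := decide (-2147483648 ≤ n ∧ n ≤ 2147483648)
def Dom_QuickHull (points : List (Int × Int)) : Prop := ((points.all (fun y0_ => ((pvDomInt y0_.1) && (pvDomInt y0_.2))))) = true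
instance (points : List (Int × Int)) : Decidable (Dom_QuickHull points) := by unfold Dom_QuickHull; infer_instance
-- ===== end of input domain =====

-- B replaces the recursion by an explicit work-stack of emit/segment tasks (alternative decomposition, same cost).

-- ===== PORT A =====
-- find_side(p1, p2, p)
def pvSide (p1 p2 p : Int × Int) : Int :=
  (p.2 - p1.2) * (p2.1 - p1.1) - (p.1 - p1.1) * (p2.2 - p1.2)

-- termination helper for hull_subset: the chosen farthest point lies on each splitting
-- line, so each filtered subset is strictly shorter (cited by decreasing_by below)
theorem pvSide_left_self (p1 far : Int × Int) : pvSide p1 far far = 0 := by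
  unfold pvSide; ring

theorem pvSide_right_self (far p2 : Int × Int) : pvSide far p2 far = 0 := by
  unfold pvSide; ring

theorem pv_length_filter_eq_countP {α : Type} (l : List α) (q : α → Bool) :
    (l.filter q).length = l.countP q := by
  induction l with
  | nil => rfl
  | cons a t ih => by_cases h : q a <;> simp [h, ih]

theorem pvFilterAttach_len {α : Type} (s : List α) (q : α → Bool) :
    (s.attach.filter (fun x => q x.1)).length = (s.filter q).length := by
  rw [pv_length_filter_eq_countP, pv_length_filter_eq_countP]
  exact List.countP_attach

theorem pvFilter_lt {s : List (Int × Int)} {far : Int × Int}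
    (hmem : far ∈ s) (p : (Int × Int) → Bool) (hp : p far = false) :
    (s.filter p).length < s.length := by
  rw [List.length_filter_lt_length_iff_exists]
  exact ⟨far, hmem, by simp [hp]⟩

-- hull_subset(p1, p2, subset_points)
def pvHullSubset (p1 p2 : Int × Int) (s : List (Int × Int)) : List (Int × Int) :=
  if s = [] then []
  else
    match h : PySem.List.max? s (fun p => |pvSide p1 p2 p|) with
    | none => []
    | some far =>
      let left := s.filter (fun p => decide (0 < pvSide p1 far p))
      let right := s.filter (fun p => decide (0 < pvSide far p2 p))
      pvHullSubset p1 far left ++ far :: pvHullSubset far p2 right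
termination_by s.length
decreasing_by
  · rw [List.length_unattach, pvFilterAttach_len s (fun p => decide (0 < pvSide p1 far p))]
    exact pvFilter_lt (PySem.List.max?_mem h) _ (by simp [pvSide_left_self])
  · rw [List.length_unattach, pvFilterAttach_len s (fun p => decide (0 < pvSide far p2 p))]
    exact pvFilter_lt (PySem.List.max?_mem h) _ (by simp [pvSide_right_self])

def QuickHull (points : List (Int × Int)) : List (Int × Int) :=
  match PySem.List.min? points (fun p => p.1), PySem.List.max? points (fun p => p.1) with
  | some mn, some mx =>
    let left := points.filter (fun p => decide (0 < pvSide mn mx p))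
    let right := points.filter (fun p => decide (0 < pvSide mx mn p))
    [mn] ++ pvHullSubset mn mx left ++ [mx] ++ pvHullSubset mx mn right
  | _, _ => []  -- empty input: Python raises ValueError (excluded by Pre_)

-- ===== PORT B =====
-- Source B's own side(p1, p2, p)
def pvSideB (p1 p2 p : Int × Int) : Int :=
  (p.2 - p1.2) * (p2.1 - p1.1) - (p.1 - p1.1) * (p2.2 - p1.2)

theorem pvSideB_eq (p1 p2 p : Int × Int) : pvSideB p1 p2 p = pvSide p1 p2 p := rfl
-- a stack entry of Source B: ("emit", p) or ("seg", p1, p2, subset); list head = top of stack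
inductive PVTask where
  | emit : Int × Int → PVTask
  | seg : Int × Int → Int × Int → List (Int × Int) → PVTask

-- Source B's farthest-point loop: state (far, fd) with fd the cached distance of far
def pvFarthest (p1 p2 : Int × Int) (x : Int × Int) (t : List (Int × Int)) : Int × Int :=
  (t.foldl
    (fun st y => if st.2 < |pvSideB p1 p2 y| then (y, |pvSideB p1 p2 y|) else st)
    (x, |pvSideB p1 p2 x|)).1

-- termination measure for the while-loop: segments weigh exponentially in subset size
def pvW : PVTask → Nat
  | .emit _ => 1
  | .seg _ _ s => 2 * 3 ^ s.length

-- farthest point is drawn from the subset (cited by decreasing_by below)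
theorem pvFarthest_pair_mem (p1 p2 : Int × Int) :
    ∀ (t : List (Int × Int)) (st : (Int × Int) × Int),
      (t.foldl (fun st y => if st.2 < |pvSide p1 p2 y| then (y, |pvSide p1 p2 y|) else st) st).1
        = st.1 ∨
      (t.foldl (fun st y => if st.2 < |pvSide p1 p2 y| then (y, |pvSide p1 p2 y|) else st) st).1 ∈ t := by
  intro t
  induction t with
  | nil => intro st; exact Or.inl rfl
  | cons y ys ih =>
    intro st
    simp only [List.foldl_cons]
    by_cases h : st.2 < |pvSide p1 p2 y|
    · simp only [if_pos h]
      rcases ih (y, |pvSide p1 p2 y|) with h1 | h1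
      · exact Or.inr (by simp [h1])
      · exact Or.inr (by simp [h1])
    · simp only [if_neg h]
      rcases ih st with h1 | h1
      · exact Or.inl h1
      · exact Or.inr (by simp [h1])

theorem pvFarthest_mem (p1 p2 x : Int × Int) (t : List (Int × Int)) :
    pvFarthest p1 p2 x t ∈ x :: t := by
  unfold pvFarthest
  simp only [pvSideB_eq]
  rcases pvFarthest_pair_mem p1 p2 t (x, |pvSide p1 p2 x|) with h | h
  · simp [h]
  · simp [h]

theorem pvRun_dec_left (p1 p2 x : Int × Int) (t : List (Int × Int)) (ts : List PVTask) :
    2 * 3 ^ (((x :: t).filter (fun p => decide (0 < pvSide p1 (pvFarthest p1 p2 x t) p))).length)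
      + (1 + (2 * 3 ^ (((x :: t).filter (fun p => decide (0 < pvSide (pvFarthest p1 p2 x t) p2 p))).length)
      + (List.map pvW ts).sum))
    < 2 * 3 ^ (x :: t).length + (List.map pvW ts).sum := by
  have hL := pvFilter_lt (s := x :: t) (far := pvFarthest p1 p2 x t)
    (pvFarthest_mem p1 p2 x t) (fun p => decide (0 < pvSide p1 (pvFarthest p1 p2 x t) p))
    (by simp [pvSide_left_self])
  have hR := pvFilter_lt (s := x :: t) (far := pvFarthest p1 p2 x t)
    (pvFarthest_mem p1 p2 x t) (fun p => decide (0 < pvSide (pvFarthest p1 p2 x t) p2 p))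
    (by simp [pvSide_right_self])
  have hn : (x :: t).length = t.length + 1 := by simp
  have h3L : 3 ^ (((x :: t).filter (fun p => decide (0 < pvSide p1 (pvFarthest p1 p2 x t) p))).length) ≤ 3 ^ t.length :=
    Nat.pow_le_pow_right (by norm_num) (by omega)
  have h3R : 3 ^ (((x :: t).filter (fun p => decide (0 < pvSide (pvFarthest p1 p2 x t) p2 p))).length) ≤ 3 ^ t.length :=
    Nat.pow_le_pow_right (by norm_num) (by omega)
  have hpos : 1 ≤ 3 ^ t.length := Nat.one_le_pow _ _ (by norm_num)
  rw [hn, pow_succ]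
  omega

-- the while-loop of Source B: pop the top task, emit or split the segment
def pvRun : List PVTask → List (Int × Int) → List (Int × Int)
  | [], acc => acc
  | .emit p :: ts, acc => pvRun ts (acc ++ [p])
  | .seg p1 p2 s :: ts, acc =>
    match s with
    | [] => pvRun ts acc
    | x :: t =>
      let far := pvFarthest p1 p2 x t
      let left := (x :: t).filter (fun p => decide (0 < pvSideB p1 far p))
      let right := (x :: t).filter (fun p => decide (0 < pvSideB far p2 p))
      pvRun (.seg p1 far left :: .emit far :: .seg far p2 right :: ts) acc
termination_by ts _ => (ts.map pvW).sum
decreasing_by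
  · simp [pvW]
  · simp [pvW]
  · simpa [pvW] using pvRun_dec_left p1 p2 x t ts

def QuickHull_alt (points : List (Int × Int)) : List (Int × Int) :=
  match points with
  | [] => []  -- Python B raises IndexError here (excluded by Pre_)
  | x :: t =>
    let mm := t.foldl
      (fun (st : (Int × Int) × (Int × Int)) p =>
        (if p.1 < st.1.1 then p else st.1, if st.2.1 < p.1 then p else st.2)) (x, x)
    let mn := mm.1
    let mx := mm.2
    let left := points.filter (fun p => decide (0 < pvSideB mn mx p))
    let right := points.filter (fun p => decide (0 < pvSideB mx mn p))
    pvRun [.emit mn, .seg mn mx left, .emit mx, .seg mx mn right] []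

-- ===== PRECONDITION & SPEC =====
-- Python A raises ValueError (min of empty sequence) on the empty list; excluded.
def Pre_QuickHull (points : List (Int × Int)) : Prop := points ≠ []
instance (points : List (Int × Int)) : Decidable (Pre_QuickHull points) := by unfold Pre_QuickHull; infer_instance
def pvWitness_QuickHull : (List (Int × Int)) := [(0, 0), (3, 1), (1, 2)]

def Spec_QuickHull (points : List (Int × Int)) (out : List (Int × Int)) : Prop := out = QuickHull_alt points
instance (points : List (Int × Int)) (out : List (Int × Int)) : Decidable (Spec_QuickHull points out) := by unfold Spec_QuickHull; infer_instance

-- ===== CLAIM (what is proved, stated in full; the proofs are below) =====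
def Claim_equal_QuickHull : Prop := ∀ (points : List (Int × Int)), Dom_QuickHull points → Pre_QuickHull points → Spec_QuickHull points (QuickHull points)

-- ===== LEMMAS AND PROOFS =====

-- Python max(xs, key) over a nonempty list is the running strict-greater fold
theorem pv_max?_go {α : Type} (key : α → Int) :
    ∀ (t : List α) (m : α),
      t.foldl (fun acc x => match acc with
        | none => some x
        | some m => if key m < key x then some x else some m) (some m)
      = some (t.foldl (fun m y => if key m < key y then y else m) m) := by
  intro t
  induction t with
  | nil => intro m; rfl
  | cons y ys ih =>
    intro m
    simp only [List.foldl_cons]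
    by_cases h : key m < key y <;> simp [h, ih]

theorem pv_max?_cons {α : Type} (key : α → Int) :
    ∀ (t : List α) (x : α),
      PySem.List.max? (x :: t) key = some (t.foldl (fun m y => if key m < key y then y else m) x) := by
  intro t x
  simp only [PySem.List.max?, List.foldl_cons]
  exact pv_max?_go key t x

theorem pv_min?_go {α : Type} (key : α → Int) :
    ∀ (t : List α) (m : α),
      t.foldl (fun acc x => match acc with
        | none => some x
        | some m => if key x < key m then some x else some m) (some m)
      = some (t.foldl (fun m y => if key y < key m then y else m) m) := by
  intro t
  induction t with
  | nil => intro m; rfl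
  | cons y ys ih =>
    intro m
    simp only [List.foldl_cons]
    by_cases h : key y < key m <;> simp [h, ih]

theorem pv_min?_cons {α : Type} (key : α → Int) :
    ∀ (t : List α) (x : α),
      PySem.List.min? (x :: t) key = some (t.foldl (fun m y => if key y < key m then y else m) x) := by
  intro t x
  simp only [PySem.List.min?, List.foldl_cons]
  exact pv_min?_go key t x

-- the cached distance in Source B's (far, fd) pair equals the distance of far
theorem pvFarthest_eq (p1 p2 : Int × Int) (t : List (Int × Int)) (x : Int × Int) :
    pvFarthest p1 p2 x t
      = t.foldl (fun m y => if |pvSide p1 p2 m| < |pvSide p1 p2 y| then y else m) x := by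
  unfold pvFarthest
  simp only [pvSideB_eq]
  induction t generalizing x with
  | nil => rfl
  | cons y ys ih =>
    simp only [List.foldl_cons]
    by_cases h : |pvSide p1 p2 x| < |pvSide p1 p2 y| <;> simp only [h, if_true, if_false, ih]

theorem pv_max?_eq_farthest (p1 p2 x : Int × Int) (t : List (Int × Int)) :
    PySem.List.max? (x :: t) (fun p => |pvSide p1 p2 p|) = some (pvFarthest p1 p2 x t) := by
  rw [pv_max?_cons, pvFarthest_eq]

-- Source B's single min/max pass equals the two independent folds
theorem pv_minmax_pair (t : List (Int × Int)) (x : Int × Int) :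
    t.foldl
      (fun (st : (Int × Int) × (Int × Int)) p =>
        (if p.1 < st.1.1 then p else st.1, if st.2.1 < p.1 then p else st.2)) (x, x)
      = (t.foldl (fun m y => if y.1 < m.1 then y else m) x,
         t.foldl (fun m y => if m.1 < y.1 then y else m) x) := by
  suffices h : ∀ (t : List (Int × Int)) (a b : Int × Int),
      t.foldl (fun (st : (Int × Int) × (Int × Int)) p =>
        (if p.1 < st.1.1 then p else st.1, if st.2.1 < p.1 then p else st.2)) (a, b)
      = (t.foldl (fun m y => if y.1 < m.1 then y else m) a,
         t.foldl (fun m y => if m.1 < y.1 then y else m) b) from h t x x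
  intro t
  induction t with
  | nil => intro a b; rfl
  | cons y ys ih => intro a b; simp only [List.foldl_cons, ih]

-- what one task contributes to the hull
def pvFlat : PVTask → List (Int × Int)
  | .emit p => [p]
  | .seg p1 p2 s => pvHullSubset p1 p2 s

-- one unfolding of pvHullSubset on a nonempty subset, phrased via pvFarthest
theorem pvHullSubset_cons (p1 p2 x : Int × Int) (t : List (Int × Int)) :
    pvHullSubset p1 p2 (x :: t)
      = pvHullSubset p1 (pvFarthest p1 p2 x t)
          ((x :: t).filter (fun p => decide (0 < pvSide p1 (pvFarthest p1 p2 x t) p)))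
        ++ pvFarthest p1 p2 x t ::
          pvHullSubset (pvFarthest p1 p2 x t) p2
            ((x :: t).filter (fun p => decide (0 < pvSide (pvFarthest p1 p2 x t) p2 p))) := by
  rw [pvHullSubset]
  rw [if_neg (List.cons_ne_nil x t)]
  have hmax := pv_max?_eq_farthest p1 p2 x t
  split
  · rename_i h; rw [hmax] at h; cases h
  · rename_i far h
    rw [hmax] at h
    have hf : far = pvFarthest p1 p2 x t := (Option.some.inj h).symm
    subst hf
    rfl

-- the work-stack loop produces the concatenation of its tasks' contributions
theorem pvHullSubset_nil (p1 p2 : Int × Int) : pvHullSubset p1 p2 [] = [] := by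
  rw [pvHullSubset]
  simp

theorem pvRun_eq_flat : ∀ (ts : List PVTask) (acc : List (Int × Int)),
    pvRun ts acc = acc ++ (ts.map pvFlat).flatten := by
  intro ts acc
  induction ts, acc using pvRun.induct with
  | case1 acc => simp [pvRun]
  | case2 p ts acc ih =>
    rw [pvRun, ih]
    simp [pvFlat]
  | case3 p1 p2 ts acc ih =>
    rw [pvRun, ih]
    simp [pvFlat, pvHullSubset_nil]
  | case4 p1 p2 ts acc x t far left right ih =>
    rw [pvRun, ih]
    simp only [List.map_cons, List.flatten_cons, pvFlat, pvHullSubset_cons]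
    simp [far, left, right, pvSideB_eq]
    rfl

-- ===== VERDICT (by name: the statement is the Claim_ definition above) =====
theorem QuickHull_spec : Claim_equal_QuickHull := by
  intro points _ hpre
  unfold Spec_QuickHull
  cases points with
  | nil => exact absurd rfl hpre
  | cons x t =>
    unfold QuickHull QuickHull_alt
    rw [pv_min?_cons, pv_max?_cons]
    simp only [pv_minmax_pair, pvRun_eq_flat, List.map_cons, List.map_nil,
      List.flatten_cons, List.flatten_nil, pvFlat, pvSideB_eq]
    simp
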